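-- pv_equiv track=rewrite | github.com/krris/tic-tac-toe | models/negamax.py | column_wins
-- ===== SOURCE A (Python) =====
-- def column_wins(grid, width, height, marks_to_win, player):
--     for x in range(width):
--         for y in range(height - marks_to_win + 1):
--             counter = 0
--             for i in range(marks_to_win):
--                 if grid[y+i][x] == player:
--                     counter += 1
--                 if counter == marks_to_win:
--                     return True
--     return False
-- ===== SOURCE B (Python) =====
-- def _max_run(col, player):
--     best = 0
--     cur = 0
--     for v in col:
--         cur = cur + 1 if v == player else 0
--         if cur > best:
--             best = cur
--     return best
--
--
-- def column_wins(grid, width, height, marks_to_win, player):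
--     if marks_to_win <= 0 or marks_to_win > height:
--         return False
--     cols = [[grid[y][x] for y in range(height)] for x in range(width)]
--     return any(marks_to_win <= _max_run(col, player) for col in cols)
-- ===== Notes on version B (the rewrite author's own statement) =====
-- stated objective: faster
-- what changed: Replaces the sliding-window triple loop (recounting each K-cell window from scratch) by extracting each column once and computing its maximum consecutive-run length in a single pass, then comparing that maximum with marks_to_win.
-- outside the precondition, e.g. on column_wins([[1], [1]], 1, 3, 2, 1): A returns True, B raises IndexError
import Mathlib
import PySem

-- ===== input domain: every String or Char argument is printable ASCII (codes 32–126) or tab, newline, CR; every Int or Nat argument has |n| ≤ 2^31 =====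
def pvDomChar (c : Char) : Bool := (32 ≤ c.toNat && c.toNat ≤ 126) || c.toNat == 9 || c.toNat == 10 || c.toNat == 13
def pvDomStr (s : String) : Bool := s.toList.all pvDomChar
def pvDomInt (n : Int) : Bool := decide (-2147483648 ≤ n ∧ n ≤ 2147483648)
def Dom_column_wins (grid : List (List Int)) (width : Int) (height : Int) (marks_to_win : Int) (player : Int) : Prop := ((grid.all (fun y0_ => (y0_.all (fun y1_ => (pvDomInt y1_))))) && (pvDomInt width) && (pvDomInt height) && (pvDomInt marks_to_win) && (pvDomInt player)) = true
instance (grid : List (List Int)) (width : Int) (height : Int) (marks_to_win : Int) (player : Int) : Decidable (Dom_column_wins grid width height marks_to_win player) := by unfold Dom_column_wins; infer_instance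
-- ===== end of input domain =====

-- B replaces A's sliding-window triple loop by extracting each column once and comparing marks_to_win with the column's maximum consecutive-run length, computed in one pass.


-- grid[r][c] == player  (false where Python would raise IndexError; such inputs are outside Pre_)
def pvCellEq (grid : List (List Int)) (r c player : Int) : Bool :=
  match PySem.List.pyGet? grid r with
  | some row =>
    match PySem.List.pyGet? row c with
    | some v => v == player
    | none => false
  | none => false

-- ===== PORT A =====
def column_wins (grid : List (List Int)) (width : Int) (height : Int) (marks_to_win : Int) (player : Int) : Bool :=
  (PySem.List.pyRange 0 width 1).any (fun x =>
    (PySem.List.pyRange 0 (height - marks_to_win + 1) 1).any (fun y =>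
      ((PySem.List.pyRange 0 marks_to_win 1).foldl
        (fun st i =>
          if st.2 then st
          else
            let counter := if pvCellEq grid (y + i) x player then st.1 + 1 else st.1
            (counter, counter == marks_to_win))
        ((0 : Int), false)).2))

-- ===== PORT B =====
-- _max_run: one pass, keeping the current run and the best run seen so far
def pvMaxRunGo (player cur best : Int) : List Int → Int
  | [] => best
  | v :: rest =>
    let cur' := if v == player then cur + 1 else 0
    pvMaxRunGo player cur' (max best cur') rest

-- [grid[y][x] for y in range(height)]  (default 0 where Python would raise; such inputs are outside Pre_)
def pvColCells (grid : List (List Int)) (height x : Int) : List Int :=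
  (PySem.List.pyRange 0 height 1).map (fun y =>
    ((PySem.List.pyGet? grid y).bind (fun row => PySem.List.pyGet? row x)).getD 0)

def column_wins_alt (grid : List (List Int)) (width : Int) (height : Int) (marks_to_win : Int) (player : Int) : Bool :=
  if marks_to_win ≤ 0 ∨ height < marks_to_win then false
  else
    ((PySem.List.pyRange 0 width 1).map (fun x => pvColCells grid height x)).any
      (fun col => decide (marks_to_win ≤ pvMaxRunGo player 0 0 col))

-- ===== PRECONDITION & SPEC =====
-- Pre_ excludes inputs on which the column scan over rows [0, height) would index outside the
-- grid (with 1 ≤ marks_to_win ≤ height and 0 < width): there A either raises IndexError itself,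
-- or returns True early before reaching the out-of-range cells, while B (which extracts whole
-- columns first) raises IndexError.
def Pre_column_wins (grid : List (List Int)) (width : Int) (height : Int) (marks_to_win : Int) (player : Int) : Prop :=
  width ≤ 0 ∨ marks_to_win ≤ 0 ∨ height < marks_to_win ∨
    (height ≤ (grid.length : Int) ∧ ∀ row ∈ grid.take height.toNat, width ≤ (row.length : Int))
instance (grid : List (List Int)) (width : Int) (height : Int) (marks_to_win : Int) (player : Int) : Decidable (Pre_column_wins grid width height marks_to_win player) := by unfold Pre_column_wins; infer_instance

def pvWitness_column_wins : List (List Int) × Int × Int × Int × Int := ([[1, 2], [1, 2]], 2, 2, 2, 1)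

def Spec_column_wins (grid : List (List Int)) (width : Int) (height : Int) (marks_to_win : Int) (player : Int) (out : Bool) : Prop := out = column_wins_alt grid width height marks_to_win player
instance (grid : List (List Int)) (width : Int) (height : Int) (marks_to_win : Int) (player : Int) (out : Bool) : Decidable (Spec_column_wins grid width height marks_to_win player out) := by unfold Spec_column_wins; infer_instance

-- ===== CLAIM (what is proved, stated in full; the proofs are below) =====
def Claim_equal_column_wins : Prop := ∀ (grid : List (List Int)) (width : Int) (height : Int) (marks_to_win : Int) (player : Int), Dom_column_wins grid width height marks_to_win player → Pre_column_wins grid width height marks_to_win player → Spec_column_wins grid width height marks_to_win player (column_wins grid width height marks_to_win player)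

-- ===== LEMMAS AND PROOFS =====

-- "the window of m cells starting at row y in column x is all player's marks"
def pvWinAt (grid : List (List Int)) (player m x y : Int) : Bool :=
  (PySem.List.pyRange 0 m 1).all (fun i => pvCellEq grid (y + i) x player)

-- "some window fully inside rows [0, u + m - 1) wins" (A's per-column expression)
def pvFoundBy (grid : List (List Int)) (player m x u : Int) : Bool :=
  (PySem.List.pyRange 0 u 1).any (fun y => pvWinAt grid player m x y)

-- run-length-with-early-flag fold over rows [0, k) of column x (proof intermediate between the two ports)
def pvBfold (grid : List (List Int)) (player m x k : Int) : Int × Bool :=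
  (PySem.List.pyRange 0 k 1).foldl
    (fun st y =>
      if st.2 then st
      else if pvCellEq grid y x player then (st.1 + 1, st.1 + 1 == m)
      else ((0 : Int), false)) ((0 : Int), false)

-- the same step on a list of cell VALUES (B's column lists)
def pvEstep (m player : Int) (st : Int × Bool) (v : Int) : Int × Bool :=
  if st.2 then st
  else if v == player then (st.1 + 1, st.1 + 1 == m)
  else ((0 : Int), false)

theorem pv_any_congr {l : List Int} {p q : Int → Bool} (h : ∀ a ∈ l, p a = q a) :
    l.any p = l.any q := by
  induction l with
  | nil => rfl
  | cons a l ih =>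
    simp only [List.any_cons]
    rw [h a (List.mem_cons_self), ih (fun b hb => h b (List.mem_cons_of_mem a hb))]

theorem any_range_succ (p : Int → Bool) (u : Int) :
    (PySem.List.pyRange 0 (u + 1) 1).any p
      = ((PySem.List.pyRange 0 u 1).any p || (if 0 ≤ u then p u else false)) := by
  by_cases h : 0 ≤ u
  · rw [PySem.List.pyRange_one_succ_right h]
    simp [h]
  · rw [PySem.List.pyRange_one_eq_nil (by omega), PySem.List.pyRange_one_eq_nil (by omega)]
    simp [h]

theorem foldA_char (grid : List (List Int)) (player m x y : Int) (hm : 0 < m) (n : Nat)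
    (hn : (n : Int) ≤ m) :
    ((PySem.List.pyRange 0 (n : Int) 1).foldl
      (fun st i => if st.2 then st
        else
          let counter := if pvCellEq grid (y + i) x player then st.1 + 1 else st.1
          (counter, counter == m)) ((0 : Int), false))
    = (((PySem.List.pyRange 0 (n : Int) 1).countP (fun i => pvCellEq grid (y + i) x player) : Int),
       (((PySem.List.pyRange 0 (n : Int) 1).countP (fun i => pvCellEq grid (y + i) x player) : Int) == m)) := by
  induction n with
  | zero =>
    rw [PySem.List.pyRange_one_eq_nil (by omega)]
    simp only [List.foldl_nil, List.countP_nil, Nat.cast_zero]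
    have : ((0 : Int) == m) = false := by simp only [beq_eq_false_iff_ne]; omega
    rw [this]
  | succ n ih =>
    have hn' : (n : Int) ≤ m := by push_cast at hn ⊢; omega
    have hcast : ((n + 1 : Nat) : Int) = (n : Int) + 1 := by push_cast; ring
    rw [hcast, PySem.List.pyRange_one_succ_right (by positivity), List.foldl_append,
      List.countP_append, ih hn']
    have hcnt : ((PySem.List.pyRange 0 (n : Int) 1).countP (fun i => pvCellEq grid (y + i) x player)) ≤ n := by
      have := List.countP_le_length (l := PySem.List.pyRange 0 (n : Int) 1)
        (p := fun i => pvCellEq grid (y + i) x player)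
      rw [PySem.List.length_pyRange_one] at this
      omega
    have hflag : (((PySem.List.pyRange 0 (n : Int) 1).countP (fun i => pvCellEq grid (y + i) x player) : Int) == m) = false := by
      simp only [beq_eq_false_iff_ne]
      push_cast at hn
      omega
    rw [List.foldl_cons, List.foldl_nil]
    simp only [hflag, if_false, Bool.false_eq_true]
    by_cases hc : pvCellEq grid (y + (n : Int)) x player = true
    · simp [hc]
    · simp only [Bool.not_eq_true] at hc
      simp [hc]

theorem innerA_eq (grid : List (List Int)) (player m x y : Int) (hm : 0 < m) :
    ((PySem.List.pyRange 0 m 1).foldl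
      (fun st i => if st.2 then st
        else
          let counter := if pvCellEq grid (y + i) x player then st.1 + 1 else st.1
          (counter, counter == m)) ((0 : Int), false)).2
    = pvWinAt grid player m x y := by
  have hmn : m = ((m.toNat : Nat) : Int) := (Int.toNat_of_nonneg hm.le).symm
  rw [show (PySem.List.pyRange 0 m 1) = (PySem.List.pyRange 0 ((m.toNat : Nat) : Int) 1) by rw [← hmn]]
  rw [foldA_char grid player m x y hm m.toNat (by omega)]
  rw [pvWinAt, show (PySem.List.pyRange 0 m 1) = (PySem.List.pyRange 0 ((m.toNat : Nat) : Int) 1) by rw [← hmn]]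
  have hlen : (PySem.List.pyRange 0 ((m.toNat : Nat) : Int) 1).length = m.toNat := by
    rw [PySem.List.length_pyRange_one]; omega
  rw [Bool.eq_iff_iff]
  simp only [beq_iff_eq, List.all_eq_true]
  rw [← List.countP_eq_length (p := fun i => pvCellEq grid (y + i) x player)]
  constructor
  · intro hEq; omega
  · intro hEq; omega

-- B's run-length fold, with m ≤ 0: the flag can never fire
theorem foldB_nonpos (grid : List (List Int)) (player m x : Int) (hm : m ≤ 0) (l : List Int) :
    ∀ st : Int × Bool, 0 ≤ st.1 → st.2 = false →
      (l.foldl (fun st y =>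
        if st.2 then st
        else if pvCellEq grid y x player then (st.1 + 1, st.1 + 1 == m)
        else ((0 : Int), false)) st).2 = false := by
  induction l with
  | nil => intro st h0 h2; simpa using h2
  | cons a l ih =>
    intro st h0 h2
    rw [List.foldl_cons]
    by_cases hc : pvCellEq grid a x player = true
    · simp only [h2, if_false, hc, if_true, Bool.false_eq_true]
      apply ih
      · simp; omega
      · simp only [beq_eq_false_iff_ne]; omega
    · simp only [Bool.not_eq_true] at hc
      simp only [h2, hc, Bool.false_eq_true, if_false]
      exact ih _ (le_refl 0) rfl

theorem pvBfold_succ (grid : List (List Int)) (player m x k : Int) (hk : 0 ≤ k) :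
    pvBfold grid player m x (k + 1)
      = (if (pvBfold grid player m x k).2 then pvBfold grid player m x k
         else if pvCellEq grid k x player then ((pvBfold grid player m x k).1 + 1, (pvBfold grid player m x k).1 + 1 == m)
         else ((0 : Int), false)) := by
  unfold pvBfold
  rw [PySem.List.pyRange_one_succ_right hk, List.foldl_append, List.foldl_cons, List.foldl_nil]

theorem foldB_char (grid : List (List Int)) (player m x : Int) (hm : 0 < m) (k : Nat) :
    ((pvBfold grid player m x (k : Int)).2
        = pvFoundBy grid player m x ((k : Int) - m + 1))
    ∧ ((pvBfold grid player m x (k : Int)).2 = false →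
        (0 ≤ (pvBfold grid player m x (k : Int)).1
          ∧ (pvBfold grid player m x (k : Int)).1 ≤ (k : Int)
          ∧ (pvBfold grid player m x (k : Int)).1 < m
          ∧ (∀ i : Int, (k : Int) - (pvBfold grid player m x (k : Int)).1 ≤ i → i < (k : Int) →
              pvCellEq grid i x player = true)
          ∧ ((pvBfold grid player m x (k : Int)).1 = (k : Int)
              ∨ pvCellEq grid ((k : Int) - (pvBfold grid player m x (k : Int)).1 - 1) x player = false))) := by
  induction k with
  | zero =>
    have hB : pvBfold grid player m x (0 : Int) = ((0 : Int), false) := by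
      unfold pvBfold; rw [PySem.List.pyRange_one_eq_nil (by omega)]; rfl
    have hF : pvFoundBy grid player m x ((0 : Int) - m + 1) = false := by
      unfold pvFoundBy; rw [PySem.List.pyRange_one_eq_nil (by omega)]; rfl
    rw [Nat.cast_zero, hB, hF]
    refine ⟨rfl, fun _ => ⟨le_refl 0, le_refl 0, hm, ?_, Or.inl rfl⟩⟩
    intro i h1 h2; omega
  | succ k ih =>
    have hcast : ((k + 1 : Nat) : Int) = (k : Int) + 1 := by push_cast; ring
    rw [hcast, pvBfold_succ grid player m x (k : Int) (by positivity)]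
    have hFsucc : pvFoundBy grid player m x ((k : Int) + 1 - m + 1)
        = (pvFoundBy grid player m x ((k : Int) - m + 1)
            || (if 0 ≤ (k : Int) - m + 1 then pvWinAt grid player m x ((k : Int) - m + 1) else false)) := by
      unfold pvFoundBy
      rw [show (k : Int) + 1 - m + 1 = ((k : Int) - m + 1) + 1 by ring]
      exact any_range_succ _ _
    by_cases hS2 : (pvBfold grid player m x (k : Int)).2 = true
    · rw [if_pos hS2]
      constructor
      · rw [hFsucc, ← ih.1, hS2, Bool.true_or]
      · intro hcontra; rw [hS2] at hcontra; exact absurd hcontra (by simp)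
    · simp only [Bool.not_eq_true] at hS2
      obtain ⟨h0, hle, hlt, hsuf, hbd⟩ := ih.2 hS2
      have hF : pvFoundBy grid player m x ((k : Int) - m + 1) = false := by rw [← ih.1, hS2]
      rw [if_neg (by simp [hS2])]
      by_cases hc : pvCellEq grid (k : Int) x player = true
      · rw [if_pos hc]
        constructor
        · -- flag equation
          rw [hFsucc, hF, Bool.false_or]
          by_cases hr : (pvBfold grid player m x (k : Int)).1 + 1 = m
          · have hpos : 0 ≤ (k : Int) - m + 1 := by omega
            rw [if_pos hpos]
            have hwin : pvWinAt grid player m x ((k : Int) - m + 1) = true := by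
              rw [pvWinAt, List.all_eq_true]
              intro i hi
              obtain ⟨hi0, him⟩ := PySem.List.mem_pyRange_one.mp hi
              by_cases hik : (k : Int) - m + 1 + i = (k : Int)
              · rw [hik]; exact hc
              · exact hsuf _ (by omega) (by omega)
            rw [hwin]; simp only [beq_iff_eq]; exact hr
          · have hflag : ((pvBfold grid player m x (k : Int)).1 + 1 == m) = false := by
              simp only [beq_eq_false_iff_ne]; exact hr
            rw [hflag]
            by_cases hpos : 0 ≤ (k : Int) - m + 1
            · rw [if_pos hpos]
              have hrk : (pvBfold grid player m x (k : Int)).1 ≠ (k : Int) := by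
                intro heq; omega
              have hmiss : pvCellEq grid ((k : Int) - (pvBfold grid player m x (k : Int)).1 - 1) x player = false := by
                rcases hbd with h | h
                · exact absurd h hrk
                · exact h
              have hne : ¬ (pvWinAt grid player m x ((k : Int) - m + 1) = true) := by
                intro hall
                rw [pvWinAt, List.all_eq_true] at hall
                have hm2 : (pvBfold grid player m x (k : Int)).1 + 2 ≤ m := by omega
                have hmem : (m - (pvBfold grid player m x (k : Int)).1 - 2) ∈ PySem.List.pyRange 0 m 1 :=
                  PySem.List.mem_pyRange_one.mpr ⟨by omega, by omega⟩
                have := hall _ hmem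
                rw [show (k : Int) - m + 1 + (m - (pvBfold grid player m x (k : Int)).1 - 2)
                      = (k : Int) - (pvBfold grid player m x (k : Int)).1 - 1 by ring] at this
                rw [hmiss] at this
                exact absurd this (by simp)
              rw [Bool.not_eq_true] at hne
              rw [hne]
            · rw [if_neg hpos]
        · -- run facts
          intro hflag
          simp only [beq_eq_false_iff_ne] at hflag
          refine ⟨by omega, by omega, by omega, ?_, ?_⟩
          · intro i h1 h2
            by_cases hik : i = (k : Int)
            · rw [hik]; exact hc
            · exact hsuf i (by omega) (by omega)
          · rcases hbd with h | h
            · left; omega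
            · right
              rw [show (k : Int) + 1 - ((pvBfold grid player m x (k : Int)).1 + 1) - 1
                    = (k : Int) - (pvBfold grid player m x (k : Int)).1 - 1 by ring]
              exact h
      · simp only [Bool.not_eq_true] at hc
        rw [if_neg (by simp [hc])]
        constructor
        · rw [hFsucc, hF, Bool.false_or]
          by_cases hpos : 0 ≤ (k : Int) - m + 1
          · rw [if_pos hpos]
            have hne : ¬ (pvWinAt grid player m x ((k : Int) - m + 1) = true) := by
              intro hall
              rw [pvWinAt, List.all_eq_true] at hall
              have hmem : (m - 1) ∈ PySem.List.pyRange 0 m 1 :=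
                PySem.List.mem_pyRange_one.mpr ⟨by omega, by omega⟩
              have := hall _ hmem
              rw [show (k : Int) - m + 1 + (m - 1) = (k : Int) by ring, hc] at this
              exact absurd this (by simp)
            rw [Bool.not_eq_true] at hne
            rw [hne]
          · rw [if_neg hpos]
        · intro _
          refine ⟨le_refl 0, by omega, hm, ?_, Or.inr ?_⟩
          · intro i h1 h2; omega
          · rw [show (k : Int) + 1 - 0 - 1 = (k : Int) by ring]
            exact hc

-- per-column equality: A's window scan = the early-flag run fold
theorem col_eq (grid : List (List Int)) (player m h_ x : Int) :
    (PySem.List.pyRange 0 (h_ - m + 1) 1).any (fun y =>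
      ((PySem.List.pyRange 0 m 1).foldl
        (fun st i => if st.2 then st
          else
            let counter := if pvCellEq grid (y + i) x player then st.1 + 1 else st.1
            (counter, counter == m)) ((0 : Int), false)).2)
      = (pvBfold grid player m x h_).2 := by
  by_cases hm : 0 < m
  · have hA : ∀ y ∈ PySem.List.pyRange 0 (h_ - m + 1) 1,
        ((PySem.List.pyRange 0 m 1).foldl
          (fun st i => if st.2 then st
            else
              let counter := if pvCellEq grid (y + i) x player then st.1 + 1 else st.1
              (counter, counter == m)) ((0 : Int), false)).2 = pvWinAt grid player m x y := by
      intro y _; exact innerA_eq grid player m x y hm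
    rw [pv_any_congr hA]
    by_cases hh : 0 ≤ h_
    · have hcast : h_ = ((h_.toNat : Nat) : Int) := (Int.toNat_of_nonneg hh).symm
      rw [hcast]
      exact ((foldB_char grid player m x hm h_.toNat).1).symm
    · have hB : pvBfold grid player m x h_ = ((0 : Int), false) := by
        unfold pvBfold; rw [PySem.List.pyRange_one_eq_nil (by omega)]; rfl
      rw [hB]
      show pvFoundBy grid player m x (h_ - m + 1) = false
      unfold pvFoundBy; rw [PySem.List.pyRange_one_eq_nil (by omega)]; rfl
  · have hA : ∀ y ∈ PySem.List.pyRange 0 (h_ - m + 1) 1,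
        ((PySem.List.pyRange 0 m 1).foldl
          (fun st i => if st.2 then st
            else
              let counter := if pvCellEq grid (y + i) x player then st.1 + 1 else st.1
              (counter, counter == m)) ((0 : Int), false)).2 = false := by
      intro y _
      rw [PySem.List.pyRange_one_eq_nil (by omega)]
      rfl
    rw [pv_any_congr hA]
    have hB : (pvBfold grid player m x h_).2 = false := by
      unfold pvBfold
      exact foldB_nonpos grid player m x (by omega) _ ((0 : Int), false) (le_refl 0) rfl
    rw [hB]
    simp

-- ===== the bridge between the early-flag run fold and B's max-run pass =====

theorem maxRun_ge_best (player : Int) : ∀ (l : List Int) (cur best : Int),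
    best ≤ pvMaxRunGo player cur best l := by
  intro l
  induction l with
  | nil => intro cur best; exact le_refl best
  | cons v l ih =>
    intro cur best
    exact le_trans (le_max_left best _) (ih _ _)

theorem estep_stays (m player : Int) : ∀ (l : List Int) (st : Int × Bool), st.2 = true →
    (l.foldl (pvEstep m player) st).2 = true := by
  intro l
  induction l with
  | nil => intro st h; simpa using h
  | cons v l ih =>
    intro st h
    rw [List.foldl_cons]
    have : pvEstep m player st v = st := by unfold pvEstep; rw [if_pos h]
    rw [this]
    exact ih st h

theorem run_char (m player : Int) : ∀ (l : List Int) (cur best : Int),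
    0 ≤ cur → cur ≤ best → best < m →
    (l.foldl (pvEstep m player) (cur, false)).2 = decide (m ≤ pvMaxRunGo player cur best l) := by
  intro l
  induction l with
  | nil =>
    intro cur best _ hcb hbm
    rw [List.foldl_nil]
    show false = decide (m ≤ pvMaxRunGo player cur best [])
    rw [show pvMaxRunGo player cur best [] = best from rfl,
      decide_eq_false (show ¬ m ≤ best by omega)]
  | cons v l ih =>
    intro cur best hc hcb hbm
    rw [List.foldl_cons]
    have hstep0 : pvEstep m player (cur, false) v
        = (if v == player then ((cur + 1 : Int), (cur + 1 == m)) else ((0 : Int), false)) := by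
      unfold pvEstep
      rw [if_neg (by simp)]
    by_cases hv : (v == player) = true
    · rw [hstep0, if_pos hv]
      have hrun : pvMaxRunGo player cur best (v :: l)
          = pvMaxRunGo player (cur + 1) (max best (cur + 1)) l := by
        simp only [pvMaxRunGo, hv, if_true]
      by_cases hcm : cur + 1 = m
      · have hflag : ((cur + 1 : Int) == m) = true := by simp only [beq_iff_eq]; exact hcm
        rw [hflag, estep_stays m player l _ rfl, hrun]
        have : m ≤ pvMaxRunGo player (cur + 1) (max best (cur + 1)) l :=
          le_trans (le_trans (by omega : m ≤ max best (cur + 1)) (le_refl _))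
            (maxRun_ge_best player l (cur + 1) (max best (cur + 1)))
        rw [decide_eq_true this]
      · have hflag : ((cur + 1 : Int) == m) = false := by
          simp only [beq_eq_false_iff_ne]; exact hcm
        rw [hflag, hrun]
        exact ih (cur + 1) (max best (cur + 1)) (by omega) (le_max_right _ _)
          (max_lt hbm (by omega))
    · simp only [Bool.not_eq_true] at hv
      rw [hstep0, hv]
      simp only [Bool.false_eq_true, if_false]
      have hrun : pvMaxRunGo player cur best (v :: l)
          = pvMaxRunGo player 0 best l := by
        simp only [pvMaxRunGo, hv, Bool.false_eq_true, if_false]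
        rw [max_eq_left (by omega : (0 : Int) ≤ best)]
      rw [hrun]
      exact ih 0 best (le_refl 0) (by omega) hbm

-- per column: the early-flag run fold over rows equals "m ≤ max run of the extracted column"
theorem colBridge (grid : List (List Int)) (player m x h_ : Int) (hm : 0 < m)
    (hcell : ∀ y : Int, 0 ≤ y → y < h_ →
      ((((PySem.List.pyGet? grid y).bind (fun row => PySem.List.pyGet? row x)).getD 0 == player)
        = pvCellEq grid y x player)) :
    (pvBfold grid player m x h_).2
      = decide (m ≤ pvMaxRunGo player 0 0 (pvColCells grid h_ x)) := by
  rw [← run_char m player (pvColCells grid h_ x) 0 0 (le_refl 0) (le_refl 0) hm]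
  unfold pvColCells pvBfold
  rw [List.foldl_map]
  congr 1
  apply PySem.List.foldl_congr_mem
  intro st y hy
  obtain ⟨hy0, hyh⟩ := PySem.List.mem_pyRange_one.mp hy
  unfold pvEstep
  rw [hcell y hy0 hyh]

theorem pvWitness_ok : Dom_column_wins pvWitness_column_wins.1 pvWitness_column_wins.2.1 pvWitness_column_wins.2.2.1 pvWitness_column_wins.2.2.2.1 pvWitness_column_wins.2.2.2.2 ∧ Pre_column_wins pvWitness_column_wins.1 pvWitness_column_wins.2.1 pvWitness_column_wins.2.2.1 pvWitness_column_wins.2.2.2.1 pvWitness_column_wins.2.2.2.2 := by decide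

theorem column_wins_spec : Claim_equal_column_wins := by
  intro grid width height marks_to_win player _ hPre
  unfold Spec_column_wins column_wins column_wins_alt
  by_cases hg : marks_to_win ≤ 0 ∨ height < marks_to_win
  · rw [if_pos hg]
    rw [List.any_eq_false]
    intro x _
    rw [Bool.not_eq_true]
    rcases hg with hg | hg
    · rw [List.any_eq_false]
      intro y _
      rw [Bool.not_eq_true, PySem.List.pyRange_one_eq_nil (show marks_to_win ≤ 0 by omega)]
      rfl
    · rw [PySem.List.pyRange_one_eq_nil (show height - marks_to_win + 1 ≤ 0 by omega)]
      rfl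
  · rw [if_neg hg, List.any_map]
    apply pv_any_congr
    intro x hx
    obtain ⟨hx0, hxw⟩ := PySem.List.mem_pyRange_one.mp hx
    rw [not_or] at hg
    obtain ⟨hm0, hmh⟩ := hg
    rcases hPre with hw | hm | hh | ⟨hlen, hrows⟩
    · omega
    · omega
    · omega
    · rw [col_eq grid player marks_to_win height x]
      show (pvBfold grid player marks_to_win x height).2
        = decide (marks_to_win ≤ pvMaxRunGo player 0 0 (pvColCells grid height x))
      apply colBridge _ _ _ _ _ (by omega)
      intro y hy0 hyh
      have hylen : y.toNat < grid.length := by omega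
      have hgy : PySem.List.pyGet? grid y = some grid[y.toNat] :=
        PySem.List.pyGet?_eq_some_getElem grid hy0 (by omega)
      have hrowmem : grid[y.toNat] ∈ grid.take height.toNat := by
        have hyn : y.toNat < height.toNat := by omega
        have : (grid.take height.toNat)[y.toNat]'(by
            rw [List.length_take]; omega) = grid[y.toNat] := by
          rw [List.getElem_take]
        rw [← this]
        exact List.getElem_mem _
      have hxlen : x.toNat < (grid[y.toNat]).length := by
        have := hrows _ hrowmem
        omega
      have hrx : PySem.List.pyGet? grid[y.toNat] x = some grid[y.toNat][x.toNat] :=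
        PySem.List.pyGet?_eq_some_getElem grid[y.toNat] hx0 (by omega)
      have hcellv : pvCellEq grid y x player = (grid[y.toNat][x.toNat] == player) := by
        simp only [pvCellEq, hgy, hrx]
      rw [hcellv, hgy]
      simp only [Option.bind_some]
      rw [hrx]
      simp only [Option.getD_some]
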